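-- pv_equiv track=rewrite | github.com/JMiko/xbmc-tvalacarta | plugins/video/pelisalacarta/resources/lib/Yonkis.py | decryptID
-- ===== SOURCE A (Python) =====
-- def decryptID(str):
-- 	c = str
-- 	d = 17
-- 	id = ""
-- 	f = 0
-- 	g = 0
-- 	b = 0
-- 	d+= 123
-- 	longitud = len(c)
-- 	for i in range(longitud):
-- 		f = d^ord(c[i])
-- 		if (longitud ==12) or (i == longitud*31) or (i == longitud*1-1) or (i == longitud *9+3):
-- 			g = f
-- 			f+= 4
-- 			g-= 1
-- 			f-= 9
-- 		elif (i>0 and d>1):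
-- 			b = i * 3
-- 			while (b>25):
-- 				b -= 4
-- 			f = 1 - b + f - 2
-- 		if d>1:
-- 			id += chr(f*1)
-- 		else:
-- 			id += chr(2*f)
-- 	return  id
-- ===== SOURCE B (Python) =====
-- def decryptID(str):
-- 	# O(n) single pass: the inner while-loop of the original is replaced by a
-- 	# closed-form reduction of b = 3*i into the range <= 25 modulo 4.
-- 	n = len(str)
-- 	out = []
-- 	for i, ch in enumerate(str):
-- 		f = 140 ^ ord(ch)
-- 		if n == 12 or i == n - 1:
-- 			f -= 5
-- 		elif i > 0:
-- 			t = 3 * i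
-- 			b = t if t <= 25 else 22 + ((t - 22) & 3)
-- 			f -= b + 1
-- 		out.append(chr(f))
-- 	return "".join(out)
-- ===== Notes on version B (the rewrite author's own statement) =====
-- stated objective: faster
-- what changed: B replaces A's inner while-loop (repeatedly subtracting 4 from 3*i) with a closed-form mod-4 reduction, drops the two index conditions that can never hold inside the loop, and builds the output as a joined list instead of repeated string concatenation.
import Mathlib
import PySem

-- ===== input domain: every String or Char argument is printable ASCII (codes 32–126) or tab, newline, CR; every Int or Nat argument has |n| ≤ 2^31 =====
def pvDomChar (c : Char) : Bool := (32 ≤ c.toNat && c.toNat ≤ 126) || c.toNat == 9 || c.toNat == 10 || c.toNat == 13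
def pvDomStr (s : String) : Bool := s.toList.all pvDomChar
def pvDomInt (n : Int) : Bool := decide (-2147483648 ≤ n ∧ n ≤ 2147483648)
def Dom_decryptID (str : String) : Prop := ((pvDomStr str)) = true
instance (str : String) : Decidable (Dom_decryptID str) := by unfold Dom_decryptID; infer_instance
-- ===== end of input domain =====

-- B replaces A's inner while-loop by a closed-form mod-4 reduction (one pass instead of a quadratic loop nest).

-- ===== PORT A =====
-- A's inner 'while b > 25: b -= 4' (b starts at i*3 ≥ 0, so kept as Nat)
def pvRedB (b : Nat) : Nat :=
  if 25 < b then pvRedB (b - 4) else b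
termination_by b
decreasing_by omega

-- Literal port of A. d = 17 + 123 (never reassigned afterwards); the variable g is written but
-- never read, so it is dropped; 'ord' is Char.toNat and 'chr' is Char.ofNat (exact here: on the
-- printable-ASCII domain f always lies in the valid code-point range); c[i] with
-- i ∈ range(len(c)) is always in range, ported as getD.
def decryptID (str : String) : String :=
  let c := str.toList
  let d : Int := 17 + 123
  let longitud := c.length
  String.mk ((List.range longitud).foldl (fun id i =>
    let f : Int := PySem.Int.bxor d ((c.getD i ' ').toNat : Int)
    let f :=
      if longitud = 12 ∨ (i : Int) = (longitud : Int) * 31 ∨ (i : Int) = (longitud : Int) * 1 - 1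
          ∨ (i : Int) = (longitud : Int) * 9 + 3 then
        f + 4 - 9
      else if 0 < i ∧ 1 < d then
        1 - (pvRedB (i * 3) : Int) + f - 2
      else f
    if 1 < d then id ++ [Char.ofNat (f * 1).toNat]
    else id ++ [Char.ofNat (2 * f).toNat]) ([] : List Char))

-- ===== PORT B =====
-- Literal port of B: one pass over enumerate(str), closed-form b, output built by map/join.
def decryptID_alt (str : String) : String :=
  let n : Int := (str.toList.length : Int)
  String.mk ((PySem.List.enumerate str.toList 0).map (fun p =>
    let f : Int := PySem.Int.bxor 140 ((p.2.toNat : Int))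
    let f :=
      if n = 12 ∨ p.1 = n - 1 then
        f - 5
      else if 0 < p.1 then
        let t := 3 * p.1
        let b := if t ≤ 25 then t else 22 + PySem.Int.band (t - 22) 3
        f - (b + 1)
      else f
    Char.ofNat f.toNat))

-- ===== PRECONDITION & SPEC =====
def Spec_decryptID (str : String) (out : String) : Prop := out = decryptID_alt str
instance (str : String) (out : String) : Decidable (Spec_decryptID str out) := by unfold Spec_decryptID; infer_instance

-- ===== CLAIM (what is proved, stated in full; the proofs are below) =====
def Claim_equal_decryptID : Prop := ∀ (str : String), Dom_decryptID str → Spec_decryptID str (decryptID str)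

-- ===== LEMMAS AND PROOFS =====

-- closed form of A's while-loop
theorem pvRedB_eq (t : Nat) : pvRedB t = if t ≤ 25 then t else 22 + (t - 22) % 4 := by
  fun_induction pvRedB t with
  | case1 t h ih =>
      rw [ih]
      split_ifs with h1 h2 <;> omega
  | case2 t h => simp [Nat.not_lt.mp h]

-- B's map over enumerate, rewritten as a map over range for comparison with A's loop
theorem map_enumerate_eq_map_range {α β : Type} (xs : List α) (g : Int × α → β) (d : α) :
    (PySem.List.enumerate xs 0).map g
      = (List.range xs.length).map (fun (k : Nat) => g ((k : Int), xs.getD k d)) := by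
  apply List.ext_getElem
  · simp [PySem.List.length_enumerate]
  · intro k h1 h2
    simp only [List.length_map, PySem.List.length_enumerate] at h1
    simp only [List.getElem_map, List.getElem_range, PySem.List.getElem_enumerate,
      List.getD_eq_getElem, h1, Int.zero_add]

-- the two per-character transforms agree at every index k < n
theorem pv_point_eq (n k : Nat) (hk : k < n) (f : Int) :
    (if n = 12 ∨ (k : Int) = (n : Int) * 31 ∨ (k : Int) = (n : Int) * 1 - 1
        ∨ (k : Int) = (n : Int) * 9 + 3 then
      f + 4 - 9
    else if 0 < k ∧ (1 : Int) < 17 + 123 then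
      1 - (pvRedB (k * 3) : Int) + f - 2
    else f) * 1
    = (if (n : Int) = 12 ∨ (k : Int) = (n : Int) - 1 then
        f - 5
      else if 0 < (k : Int) then
        f - ((if 3 * (k : Int) ≤ 25 then 3 * (k : Int)
              else 22 + PySem.Int.band (3 * (k : Int) - 22) 3) + 1)
      else f) := by
  by_cases hc : (n : Int) = 12 ∨ (k : Int) = (n : Int) - 1
  · rw [if_pos hc, if_pos (by omega)]
    ring
  · rw [if_neg hc, if_neg (by omega)]
    by_cases hp : 0 < k
    · rw [if_pos ⟨hp, by norm_num⟩, if_pos (by omega)]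
      rw [pvRedB_eq]
      by_cases h25 : k * 3 ≤ 25
      · rw [if_pos h25, if_pos (by omega)]
        push_cast
        ring
      · rw [if_neg h25, if_neg (by omega)]
        have hsub : 3 * (k : Int) - 22 = ((3 * k - 22 : Nat) : Int) := by omega
        have hband : PySem.Int.band (3 * (k : Int) - 22) 3 = ((3 * k - 22) % 4 : Nat) := by
          rw [hsub, show (3 : Int) = ((3 : Nat) : Int) from rfl, PySem.Int.band_natCast]
          norm_num [Nat.and_two_pow_sub_one_eq_mod (3 * k - 22) 2]
        rw [hband]
        have : k * 3 - 22 = 3 * k - 22 := by omega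
        rw [this]
        push_cast
        omega
    · rw [if_neg (by omega : ¬(0 < k ∧ (1 : Int) < 17 + 123)), if_neg (by omega)]
      ring

-- ===== VERDICT (by name: the statement is the Claim_ definition above) =====
theorem decryptID_spec : Claim_equal_decryptID := by
  intro s _
  unfold Spec_decryptID decryptID decryptID_alt
  simp only []
  rw [map_enumerate_eq_map_range s.toList _ ' ']
  refine congrArg String.mk ?_
  simp only [show ∀ (x y : List Char), (if (1 : Int) < 17 + 123 then x else y) = x from
    fun x y => if_pos (by norm_num)]
  rw [show ∀ (g : Nat → Char) (l : List Nat),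
      l.foldl (fun id i => id ++ [g i]) ([] : List Char) = l.map g from
    fun g l => by simpa using PySem.List.foldl_append_singleton_eq_map g l []]
  apply List.map_congr_left
  intro k hk
  simp only [List.mem_range] at hk
  rw [pv_point_eq _ _ hk]
  norm_num [show ((17 : Int) + 123) = 140 from rfl]
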